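-- pv_equiv track=rewrite | github.com/Makani-C/FairvoteRCVApp | app/utils/results.py | _select_option_to_eliminate
-- ===== SOURCE A (Python) =====
-- from typing import List, Dict, Any, Optional, Set, Tuple
--
-- def _select_option_to_eliminate(vote_counts: Dict[int, int]) -> Optional[int]:
--     """
--     Select which option to eliminate based on vote counts.
--
--     In standard IRV, the option with the fewest votes is eliminated.
--     In case of a tie for fewest votes, this implementation eliminates
--     the option with the lowest ID for deterministic results.
--     """
--     if not vote_counts:
--         return None
--
--     min_votes = min(vote_counts.values())
--
--     # Find all options with the minimum vote count
--     tied_options = [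
--         option_id for option_id, count in vote_counts.items()
--         if count == min_votes
--     ]
--
--     return min(tied_options) if tied_options else None
-- ===== SOURCE B (Python) =====
-- from typing import Dict, Optional
--
-- def _select_option_to_eliminate(vote_counts: Dict[int, int]) -> Optional[int]:
--     """Order all options by (vote count, option id) ascending and eliminate
--     the first one: fewest votes, ties broken by lowest ID."""
--     ordered = sorted(vote_counts.items(), key=lambda kv: (kv[1], kv[0]))
--     return ordered[0][0] if ordered else None
-- ===== Notes on version B (the rewrite author's own statement) =====
-- stated objective: alternative
-- what changed: Replaces A's three linear passes (min of values, build the tied-id list, min of the tied ids) with a sort of the items by the tuple (count, id) followed by taking the first element's key; a comparison-sort strategy instead of min-scans, trading O(n) for O(n log n).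
import Mathlib
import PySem

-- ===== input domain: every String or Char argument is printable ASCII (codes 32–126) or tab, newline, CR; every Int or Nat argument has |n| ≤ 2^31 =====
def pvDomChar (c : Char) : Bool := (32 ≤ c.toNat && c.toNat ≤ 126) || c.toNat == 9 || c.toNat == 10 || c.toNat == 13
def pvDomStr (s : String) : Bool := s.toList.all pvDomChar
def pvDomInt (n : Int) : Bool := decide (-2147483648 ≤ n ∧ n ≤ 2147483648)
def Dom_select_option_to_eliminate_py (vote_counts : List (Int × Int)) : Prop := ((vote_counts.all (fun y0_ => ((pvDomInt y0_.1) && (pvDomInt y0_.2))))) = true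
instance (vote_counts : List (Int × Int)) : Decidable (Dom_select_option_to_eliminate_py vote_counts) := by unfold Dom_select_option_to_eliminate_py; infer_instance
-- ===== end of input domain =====

-- B orders the items by (count, id) with a sort and eliminates the first one,
-- instead of A's three passes (min of values, tied list, min of tied ids); same
-- result, a sort-based alternative (not claimed faster).

-- ===== PORT A =====
def select_option_to_eliminate_py (vote_counts : List (Int × Int)) : Option Int :=
  if vote_counts = [] then none
  else
    match PySem.List.min? (vote_counts.map (fun p => p.2)) (fun v => v) with
    | none => none
    | some min_votes =>
      let tied_options := (vote_counts.filter (fun p => p.2 == min_votes)).map (fun p => p.1)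
      if tied_options ≠ [] then PySem.List.min? tied_options (fun i => i) else none

-- ===== PORT B =====
def select_option_to_eliminate_py_alt (vote_counts : List (Int × Int)) : Option Int :=
  let ordered := PySem.List.sorted2 vote_counts (fun kv => kv.2) (fun kv => kv.1)
  match ordered with
  | [] => none
  | kv :: _ => some kv.1

-- ===== PRECONDITION & SPEC =====
def Spec_select_option_to_eliminate_py (vote_counts : List (Int × Int)) (out : Option Int) : Prop := out = select_option_to_eliminate_py_alt vote_counts
instance (vote_counts : List (Int × Int)) (out : Option Int) : Decidable (Spec_select_option_to_eliminate_py vote_counts out) := by unfold Spec_select_option_to_eliminate_py; infer_instance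

-- ===== CLAIM (what is proved, stated in full; the proofs are below) =====
def Claim_equal_select_option_to_eliminate_py : Prop := ∀ (vote_counts : List (Int × Int)), Dom_select_option_to_eliminate_py vote_counts → Spec_select_option_to_eliminate_py vote_counts (select_option_to_eliminate_py vote_counts)

-- ===== LEMMAS AND PROOFS =====

-- the strict lexicographic comparison sorted2 uses with keys (snd, fst)
def pvLexLt (a b : Int × Int) : Bool :=
  decide (a.2 < b.2) || !decide (b.2 < a.2) && decide (a.1 < b.1)

-- lexicographic ≤ on (count, id)
def pvLexLe (m y : Int × Int) : Prop := m.2 < y.2 ∨ (m.2 = y.2 ∧ m.1 ≤ y.1)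

lemma pvLexLe_of_lt {a b : Int × Int} (h : pvLexLt a b = true) : pvLexLe a b := by
  unfold pvLexLt at h; unfold pvLexLe; simp at h; omega

lemma pvLexLe_of_not_lt {a b : Int × Int} (h : ¬ pvLexLt a b = true) : pvLexLe b a := by
  unfold pvLexLt at h; unfold pvLexLe; simp at h; omega

lemma pvLexLe_trans {a b c : Int × Int} (h1 : pvLexLe a b) (h2 : pvLexLe b c) : pvLexLe a c := by
  unfold pvLexLe at *; omega

-- inserting into a list whose head is a lex-min keeps the head a lex-min
lemma insertBy_head_min (x : Int × Int) (acc : List (Int × Int))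
    (hacc : ∀ h t, acc = h :: t → ∀ y ∈ acc, pvLexLe h y) :
    ∀ h t, PySem.List.insertBy pvLexLt x acc = h :: t →
      ∀ y ∈ PySem.List.insertBy pvLexLt x acc, pvLexLe h y := by
  cases acc with
  | nil =>
    intro h t heq y hy
    simp [PySem.List.insertBy] at heq hy
    subst hy
    rw [← heq.1]
    exact Or.inr ⟨rfl, le_refl _⟩
  | cons a as =>
    intro h t heq y hy
    by_cases hlt : pvLexLt x a = true
    · simp only [PySem.List.insertBy, hlt, if_true] at heq hy
      have hh : x = h := (List.cons.injEq _ _ _ _).mp heq |>.1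
      subst hh
      rcases List.mem_cons.mp hy with rfl | hy'
      · exact Or.inr ⟨rfl, le_refl _⟩
      · exact pvLexLe_trans (pvLexLe_of_lt hlt) (hacc a as rfl y hy')
    · simp only [PySem.List.insertBy, hlt] at heq hy
      have hh : a = h := (List.cons.injEq _ _ _ _).mp heq |>.1
      subst hh
      rcases List.mem_cons.mp hy with rfl | hy'
      · exact Or.inr ⟨rfl, le_refl _⟩
      · rcases (PySem.List.mem_insertBy pvLexLt x y as).mp hy' with rfl | hy''
        · exact pvLexLe_of_not_lt hlt
        · exact hacc a as rfl y (List.mem_cons_of_mem _ hy'')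

-- the head of the insertion-sort fold is a lex-min of the result
lemma foldl_insertBy_head_min (xs : List (Int × Int)) :
    ∀ (acc : List (Int × Int)), (∀ h t, acc = h :: t → ∀ y ∈ acc, pvLexLe h y) →
    ∀ h t, xs.foldl (fun acc x => PySem.List.insertBy pvLexLt x acc) acc = h :: t →
      ∀ y ∈ xs.foldl (fun acc x => PySem.List.insertBy pvLexLt x acc) acc, pvLexLe h y := by
  induction xs with
  | nil => intro acc hacc h t heq; rw [heq]; intro y hy; rw [← heq] at hy; exact hacc h t heq y hy
  | cons x xs ih =>
    intro acc hacc
    simp only [List.foldl_cons]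
    exact ih (PySem.List.insertBy pvLexLt x acc) (insertBy_head_min x acc hacc)

-- sorted2 with keys (snd, fst) IS that fold
lemma sorted2_eq_fold (xs : List (Int × Int)) :
    PySem.List.sorted2 xs (fun kv => kv.2) (fun kv => kv.1) =
      xs.foldl (fun acc x => PySem.List.insertBy pvLexLt x acc) [] := rfl

-- head of B's ordered list lex-≤ every input element, and is itself an input element
lemma sorted2_head_spec (xs : List (Int × Int)) (h : Int × Int) (t : List (Int × Int))
    (heq : PySem.List.sorted2 xs (fun kv => kv.2) (fun kv => kv.1) = h :: t) :
    h ∈ xs ∧ ∀ y ∈ xs, pvLexLe h y := by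
  have hperm := PySem.List.sorted2_perm xs (fun kv => kv.2) (fun kv => kv.1) false
  constructor
  · exact hperm.mem_iff.mp (by rw [heq]; exact List.mem_cons_self)
  · intro y hy
    have hy' : y ∈ PySem.List.sorted2 xs (fun kv => kv.2) (fun kv => kv.1) := hperm.mem_iff.mpr hy
    rw [sorted2_eq_fold] at heq hy'
    exact foldl_insertBy_head_min xs [] (by intro _ _ h; cases h) h t heq y hy'

-- ===== VERDICT (by name: the statement is the Claim_ definition above) =====
theorem select_option_to_eliminate_py_spec : Claim_equal_select_option_to_eliminate_py := by
  intro vc _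
  unfold Spec_select_option_to_eliminate_py
  unfold select_option_to_eliminate_py select_option_to_eliminate_py_alt
  by_cases hnil : vc = []
  · subst hnil; rfl
  · simp only [hnil, ite_false]
    -- B's value: the sorted list is nonempty
    obtain ⟨w, rest, hsorted⟩ :
        ∃ w rest, PySem.List.sorted2 vc (fun kv => kv.2) (fun kv => kv.1) = w :: rest := by
      cases hs : PySem.List.sorted2 vc (fun kv => kv.2) (fun kv => kv.1) with
      | nil =>
        have := (PySem.List.sorted2_perm vc (fun kv => kv.2) (fun kv => kv.1) false)
        rw [hs] at this
        exact absurd this.symm.eq_nil hnil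
      | cons w rest => exact ⟨w, rest, rfl⟩
    obtain ⟨hwmem, hwle⟩ := sorted2_head_spec vc w rest hsorted
    -- A's value
    have hvals : (vc.map (fun p => p.2)) ≠ [] := by simp [hnil]
    obtain ⟨mv, hmv⟩ : ∃ mv, PySem.List.min? (vc.map (fun p => p.2)) (fun v => v) = some mv := by
      cases hm : PySem.List.min? (vc.map (fun p => p.2)) (fun v => v) with
      | none => exact absurd ((PySem.List.min?_eq_none_iff _ _).mp hm) hvals
      | some m => exact ⟨m, rfl⟩
    rw [hmv]
    have hmvmem := PySem.List.min?_mem hmv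
    have hmvmin := PySem.List.min?_isMin hmv
    obtain ⟨p, hp, hpv⟩ := List.mem_map.mp hmvmem
    -- mv = w.2
    have hwv : w.2 = mv := by
      have h1 : mv ≤ w.2 := hmvmin w.2 (List.mem_map.mpr ⟨w, hwmem, rfl⟩)
      have h2 := hwle p hp
      unfold pvLexLe at h2
      omega
    show (if List.map (fun p => p.1) (List.filter (fun p => p.2 == mv) vc) ≠ [] then
        PySem.List.min? (List.map (fun p => p.1) (List.filter (fun p => p.2 == mv) vc)) (fun i => i)
      else none) = _
    rw [hsorted]
    have htne : List.map (fun p => p.1) (List.filter (fun p => p.2 == mv) vc) ≠ [] := by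
      intro hcon
      have hpmem : p.1 ∈ List.map (fun p => p.1) (List.filter (fun p => p.2 == mv) vc) :=
        List.mem_map.mpr ⟨p, List.mem_filter.mpr ⟨hp, by simp [hpv]⟩, rfl⟩
      rw [hcon] at hpmem
      exact absurd hpmem (List.not_mem_nil)
    rw [if_pos htne]
    obtain ⟨r, hr⟩ : ∃ r, PySem.List.min? (List.map (fun p => p.1) (List.filter (fun p => p.2 == mv) vc)) (fun i => i) = some r := by
      cases hm : PySem.List.min? (List.map (fun p => p.1) (List.filter (fun p => p.2 == mv) vc)) (fun i => i) with
      | none => exact absurd ((PySem.List.min?_eq_none_iff _ _).mp hm) htne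
      | some m => exact ⟨m, rfl⟩
    rw [hr]
    have hrmem := PySem.List.min?_mem hr
    have hrmin := PySem.List.min?_isMin hr
    have h1 : r ≤ w.1 := by
      apply hrmin
      exact List.mem_map.mpr ⟨w, List.mem_filter.mpr ⟨hwmem, by simp [hwv]⟩, rfl⟩
    have h2 : w.1 ≤ r := by
      obtain ⟨q, hq, hq1⟩ := List.mem_map.mp hrmem
      obtain ⟨hqmem, hqv⟩ := List.mem_filter.mp hq
      have hle := hwle q hqmem
      unfold pvLexLe at hle
      simp at hqv
      omega
    rw [le_antisymm h1 h2]
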